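-- pv_equiv track=rewrite | github.com/binduhegde/games | sudoku_gui/main.py | create_text
-- ===== SOURCE A (Python) =====
-- def create_text(already, new):
--     result = ''
--     for char in new:
--         if char in already:
--             already = already.replace(char, '')
--         else:
--             result += char
--     result += already
--     return result
-- ===== SOURCE B (Python) =====
-- def create_text(already, new):
--     # One pass over `new` builds a first-occurrence index table; then the
--     # distinct chars of `already` mark which first occurrences must be dropped.
--     first = {}
--     for i, ch in enumerate(new):
--         if ch not in first:
--             first[ch] = i
--     drop = set()
--     for c in set(already):
--         if c in first:
--             drop.add(first[c])
--     result = ''.join(ch for i, ch in enumerate(new) if i not in drop)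
--     new_chars = set(new)
--     leftover = ''.join(ch for ch in already if ch not in new_chars)
--     return result + leftover
-- ===== Notes on version B (the rewrite author's own statement) =====
-- stated objective: alternative
-- what changed: Instead of scanning new while repeatedly probing and rewriting the shrinking already string, B builds a first-occurrence index table of new in one pass, marks a drop-index set from already's distinct characters, and emits the result and the leftover in two independent filter passes (worst-case O(n+m) vs A's O(n*m), though typical inputs do not show a measured speedup).
import Mathlib
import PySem

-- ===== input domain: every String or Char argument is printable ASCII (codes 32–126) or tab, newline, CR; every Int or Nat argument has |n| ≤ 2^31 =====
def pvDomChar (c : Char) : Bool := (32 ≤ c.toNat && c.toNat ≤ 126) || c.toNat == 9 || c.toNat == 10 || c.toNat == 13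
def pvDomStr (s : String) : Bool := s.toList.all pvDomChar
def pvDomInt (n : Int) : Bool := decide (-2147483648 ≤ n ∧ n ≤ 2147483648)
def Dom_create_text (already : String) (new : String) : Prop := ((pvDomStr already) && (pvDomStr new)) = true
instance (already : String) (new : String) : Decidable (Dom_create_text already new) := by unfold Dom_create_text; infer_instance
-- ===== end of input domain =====

-- B rebuilds the same string via a first-occurrence index table and two filter passes (alternative decomposition; return value proved equal).

-- ===== PORT A =====
-- loop state: (result, already); `char in already` on a 1-char needle is membership,
-- `already.replace(char, '')` removes every occurrence of that char = filter (exact).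
def create_text (already : String) (new : String) : String :=
  let st := new.toList.foldl
    (fun (st : List Char × List Char) c =>
      if c ∈ st.2 then (st.1, st.2.filter (· ≠ c)) else (st.1 ++ [c], st.2))
    ([], already.toList)
  String.ofList (st.1 ++ st.2)

-- ===== PORT B =====
-- Source B step for step.  The Python `for c in set(already)` iterates in hash order; it only
-- BUILDS the set `drop`, whose contents are order-independent, so folding over
-- PySem.Set.ofList (insertion order) is exact.
def create_text_alt (already : String) (new : String) : String :=
  let n := new.toList
  let first := (PySem.List.enumerate n 0).foldl
      (fun (d : PySem.Dict Char Int) p => if d.contains p.2 then d else d.insert p.2 p.1)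
      PySem.Dict.empty
  let drop := (PySem.Set.ofList already.toList).foldl
      (fun (s : PySem.Set Int) c =>
        match first.get? c with
        | some i => PySem.Set.add s i
        | none => s)
      PySem.Set.empty
  let result := ((PySem.List.enumerate n 0).filter
      (fun p => !(PySem.Set.contains drop p.1))).map (·.2)
  let newChars := PySem.Set.ofList n
  let leftover := already.toList.filter (fun ch => !(PySem.Set.contains newChars ch))
  String.ofList (result ++ leftover)

-- ===== PRECONDITION & SPEC =====
def Spec_create_text (already : String) (new : String) (out : String) : Prop := out = create_text_alt already new
instance (already : String) (new : String) (out : String) : Decidable (Spec_create_text already new out) := by unfold Spec_create_text; infer_instance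

-- ===== CLAIM (what is proved, stated in full; the proofs are below) =====
def Claim_equal_create_text : Prop := ∀ (already : String) (new : String), Dom_create_text already new → Spec_create_text already new (create_text already new)

-- ===== LEMMAS AND PROOFS =====

-- reference result of A's scan: drop c when it is (still) in al, removing all its copies
def keepRef : List Char → List Char → List Char
  | _, [] => []
  | al, c :: t => if c ∈ al then keepRef (al.filter (· ≠ c)) t else c :: keepRef al t

theorem keepRef_congr : ∀ (t al al' : List Char), (∀ x, x ∈ al ↔ x ∈ al') →
    keepRef al t = keepRef al' t := by
  intro t
  induction t with
  | nil => intro al al' _; rfl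
  | cons c t ih =>
    intro al al' h
    by_cases hc : c ∈ al
    · have hc' : c ∈ al' := (h c).mp hc
      simp only [keepRef, hc, hc', if_pos]
      exact ih _ _ (fun x => by simp [List.mem_filter, h x])
    · have hc' : c ∉ al' := fun hx => hc ((h c).mpr hx)
      simp only [keepRef, hc, hc', if_neg, not_false_iff]
      exact congrArg (c :: ·) (ih _ _ h)

theorem foldA_eq : ∀ (t res al : List Char),
    t.foldl
      (fun (st : List Char × List Char) c =>
        if c ∈ st.2 then (st.1, st.2.filter (· ≠ c)) else (st.1 ++ [c], st.2))
      (res, al)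
    = (res ++ keepRef al t, al.filter (fun a => decide (a ∉ t))) := by
  intro t
  induction t with
  | nil => intro res al; simp [keepRef]
  | cons c t ih =>
    intro res al
    by_cases hc : c ∈ al
    · simp only [List.foldl_cons, hc, if_pos, keepRef]
      rw [ih, List.filter_filter]
      refine congrArg (Prod.mk _) ?_
      apply List.filter_congr
      intro a _
      simp only [List.mem_cons, decide_not]
      by_cases h1 : a = c <;> by_cases h2 : a ∈ t <;> simp [h1, h2]
    · simp only [List.foldl_cons, hc, if_neg, not_false_iff, keepRef]
      rw [ih]
      refine Prod.ext ?_ ?_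
      · simp [List.append_assoc]
      · apply List.filter_congr
        intro a ha
        have : a ≠ c := fun h => hc (h ▸ ha)
        simp [List.mem_cons, this]

-- first index of c in a list
def fidx : List Char → Char → Option Nat
  | [], _ => none
  | x :: t, c => if x = c then some 0 else (fidx t c).map (· + 1)

theorem fidx_getElem : ∀ (n : List Char) (c : Char) (k : Nat), fidx n c = some k →
    ∃ h : k < n.length, n[k] = c := by
  intro n
  induction n with
  | nil => intro c k h; simp [fidx] at h
  | cons x t ih =>
    intro c k h
    by_cases hx : x = c
    · simp only [fidx, hx, if_pos] at h
      obtain rfl : k = 0 := by simpa using h.symm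
      exact ⟨by simp, hx⟩
    · simp only [fidx, hx, if_neg, not_false_iff, Option.map_eq_some_iff] at h
      obtain ⟨k', hk', rfl⟩ := h
      obtain ⟨h1, h2⟩ := ih c k' hk'
      exact ⟨by simpa using h1, by simpa using h2⟩

theorem fidx_append_self : ∀ (seen t : List Char) (c : Char),
    fidx (seen ++ c :: t) c = some seen.length ↔ c ∉ seen := by
  intro seen
  induction seen with
  | nil => intro t c; simp [fidx]
  | cons x s ih =>
    intro t c
    by_cases hx : x = c
    · subst hx
      simp [fidx]
    · simp only [List.cons_append, fidx, hx, if_neg, not_false_iff, Option.map_eq_some_iff,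
        List.length_cons, List.mem_cons]
      constructor
      · rintro ⟨k', hk', hlen⟩
        have : k' = s.length := by omega
        subst this
        exact fun h => ((ih t c).mp hk') (h.resolve_left (fun hc => hx hc.symm))
      · intro h
        have hc : c ∉ s := fun hs => h (Or.inr hs)
        exact ⟨s.length, (ih t c).mpr hc, rfl⟩

theorem first_get_aux (c : Char) : ∀ (t : List Char) (s : Int) (d : PySem.Dict Char Int),
    ((PySem.List.enumerate t s).foldl
      (fun (d : PySem.Dict Char Int) p => if d.contains p.2 then d else d.insert p.2 p.1)
      d).get? c = (d.get? c).or ((fidx t c).map (fun k => s + (k : Int))) := by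
  intro t
  induction t with
  | nil =>
    intro s d
    simp [PySem.List.enumerate_nil, fidx]
  | cons x t ih =>
    intro s d
    rw [PySem.List.enumerate_cons, List.foldl_cons]
    by_cases hx : d.contains x
    · rw [if_pos hx, ih]
      have hxc : x ≠ c ∨ (d.get? c).isSome := by
        by_cases h : x = c
        · subst h; right; rw [← PySem.Dict.contains_eq_isSome_get?]; exact hx
        · left; exact h
      cases hdc : d.get? c with
      | some v => simp [Option.some_or]
      | none =>
        simp only [Option.none_or]
        have hxc' : x ≠ c := by
          rcases hxc with h | h
          · exact h
          · rw [hdc] at h; simp at h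
        simp only [fidx, hxc', if_neg, not_false_iff]
        cases fidx t c with
        | none => simp
        | some k => simp; all_goals omega
    · rw [if_neg hx, ih]
      by_cases hc : x = c
      · subst hc
        rw [PySem.Dict.get?_insert_self]
        have hdx : (PySem.Dict.get? d x) = none := by
          cases h : d.get? x with
          | none => rfl
          | some v =>
            exfalso
            rw [PySem.Dict.contains_eq_isSome_get?, h] at hx
            simp at hx
        rw [hdx, Option.some_or, Option.none_or]
        simp [fidx]
      · rw [PySem.Dict.get?_insert_of_ne _ _ (fun h => hc h.symm)]
        cases hdc : d.get? c with
        | some v => simp [Option.some_or]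
        | none =>
          simp only [Option.none_or]
          simp only [fidx, hc, if_neg, not_false_iff]
          cases fidx t c with
          | none => simp
          | some k => simp; all_goals omega

theorem first_get (n : List Char) (c : Char) :
    ((PySem.List.enumerate n 0).foldl
      (fun (d : PySem.Dict Char Int) p => if d.contains p.2 then d else d.insert p.2 p.1)
      PySem.Dict.empty).get? c = (fidx n c).map (fun k : Nat => (k : Int)) := by
  rw [first_get_aux c n 0 PySem.Dict.empty]
  rw [PySem.Dict.get?_empty, Option.none_or]
  cases fidx n c <;> simp

theorem mem_drop_fold (F : PySem.Dict Char Int) : ∀ (l : List Char) (s0 : PySem.Set Int) (y : Int),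
    y ∈ l.foldl
      (fun (s : PySem.Set Int) c =>
        match F.get? c with
        | some i => PySem.Set.add s i
        | none => s) s0
    ↔ y ∈ s0 ∨ ∃ c ∈ l, F.get? c = some y := by
  intro l
  induction l with
  | nil => intro s0 y; simp
  | cons c l ih =>
    intro s0 y
    rw [List.foldl_cons]
    cases hF : F.get? c with
    | none =>
      rw [ih]
      constructor
      · rintro (h | ⟨c', hc', h⟩)
        · exact Or.inl h
        · exact Or.inr ⟨c', List.mem_cons_of_mem _ hc', h⟩
      · rintro (h | ⟨c', hc', h⟩)
        · exact Or.inl h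
        · rcases List.mem_cons.mp hc' with rfl | hc''
          · rw [hF] at h; simp at h
          · exact Or.inr ⟨c', hc'', h⟩
    | some i =>
      rw [ih, PySem.Set.mem_add]
      constructor
      · rintro ((h | rfl) | ⟨c', hc', h⟩)
        · exact Or.inl h
        · exact Or.inr ⟨c, List.mem_cons_self, hF⟩
        · exact Or.inr ⟨c', List.mem_cons_of_mem _ hc', h⟩
      · rintro (h | ⟨c', hc', h⟩)
        · exact Or.inl (Or.inl h)
        · rcases List.mem_cons.mp hc' with rfl | hc''
          · rw [hF] at h
            exact Or.inl (Or.inr (by simpa using h.symm))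
          · exact Or.inr ⟨c', hc'', h⟩

-- the filtered enumeration is A's kept part
theorem step2 (N : List Char) : ∀ (t al seen : List Char), N = seen ++ t →
    ((PySem.List.enumerate t (seen.length : Int)).filter
      (fun p => !decide (∃ c, c ∈ al ∧ (fidx N c).map (fun k : Nat => (k : Int)) = some p.1))).map (·.2)
    = keepRef (al.filter (fun a => decide (a ∉ seen))) t := by
  intro t
  induction t with
  | nil => intro al seen _; simp [PySem.List.enumerate_nil, keepRef]
  | cons c t ih =>
    intro al seen hN
    rw [PySem.List.enumerate_cons]
    have hkey : (∃ c', c' ∈ al ∧ (fidx N c').map (fun k : Nat => (k : Int)) = some ((seen.length : Int)))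
        ↔ (c ∈ al ∧ c ∉ seen) := by
      constructor
      · rintro ⟨c', hc', heq⟩
        rw [Option.map_eq_some_iff] at heq
        obtain ⟨k, hk, hcast⟩ := heq
        have hkl : k = seen.length := by exact_mod_cast hcast
        rw [hkl] at hk
        obtain ⟨hlt, hget⟩ := fidx_getElem N c' seen.length hk
        have h1 : N[seen.length]? = some c' := by
          rw [List.getElem?_eq_getElem hlt, hget]
        have h2 : N[seen.length]? = some c := by
          subst hN
          rw [List.getElem?_append_right (Nat.le_refl _)]
          simp
        have hcc : c' = c := by
          have h3 := h1.symm.trans h2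
          injection h3
        subst hcc
        refine ⟨hc', ?_⟩
        rw [hN] at hk
        exact (fidx_append_self seen t c').mp hk
      · rintro ⟨hcal, hcs⟩
        refine ⟨c, hcal, ?_⟩
        rw [Option.map_eq_some_iff]
        refine ⟨seen.length, ?_, rfl⟩
        rw [hN]
        exact (fidx_append_self seen t c).mpr hcs
    have hN' : N = (seen ++ [c]) ++ t := by rw [hN]; simp
    have hlen' : ((seen ++ [c]).length : Int) = (seen.length : Int) + 1 := by
      simp [List.length_append]
    have ihc := ih al (seen ++ [c]) hN'
    rw [hlen'] at ihc
    by_cases hcase : c ∈ al ∧ c ∉ seen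
    · -- head dropped on both sides
      rw [List.filter_cons_of_neg (by
        simp
        exact ⟨c, hcase.1, by rw [hN]; exact (fidx_append_self seen t c).mpr hcase.2⟩)]
      rw [ihc]
      have hcf : c ∈ al.filter (fun a => decide (a ∉ seen)) := by
        simp [List.mem_filter, hcase.1, hcase.2]
      simp only [keepRef]
      rw [if_pos hcf]
      apply keepRef_congr
      intro x
      simp only [List.mem_filter, List.mem_append, List.mem_singleton, decide_not,
        Bool.not_eq_true', decide_eq_false_iff_not]
      constructor
      · rintro ⟨hx1, hx2⟩
        exact ⟨⟨hx1, fun h => hx2 (Or.inl h)⟩, fun h => hx2 (Or.inr h)⟩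
      · rintro ⟨⟨hx1, hx2⟩, hx3⟩
        refine ⟨hx1, fun h => ?_⟩
        rcases h with h | h
        · exact hx2 h
        · exact hx3 h
    · -- head kept on both sides
      rw [List.filter_cons_of_pos (by
        simp
        intro c' hc' h
        exact hcase (hkey.mp ⟨c', hc', by rw [h]; simp⟩))]
      rw [List.map_cons, ihc]
      have hcf : c ∉ al.filter (fun a => decide (a ∉ seen)) := by
        intro h
        rw [List.mem_filter] at h
        exact hcase ⟨h.1, by simpa using h.2⟩
      simp only [keepRef]
      rw [if_neg hcf]
      refine congrArg (c :: ·) ?_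
      apply keepRef_congr
      intro x
      simp only [List.mem_filter, List.mem_append, List.mem_singleton, decide_not,
        Bool.not_eq_true', decide_eq_false_iff_not]
      constructor
      · rintro ⟨hx1, hx2⟩
        exact ⟨hx1, fun h => hx2 (Or.inl h)⟩
      · rintro ⟨hx1, hx2⟩
        refine ⟨hx1, fun h => ?_⟩
        rcases h with h | h
        · exact hx2 h
        · subst h
          exact hcase ⟨hx1, hx2⟩

-- ===== VERDICT (by name: the statement is the Claim_ definition above) =====
theorem create_text_spec : Claim_equal_create_text := by
  intro already new _
  unfold Spec_create_text create_text create_text_alt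
  simp only []
  set al := already.toList with hal
  set n := new.toList with hn
  rw [foldA_eq]
  -- B side
  have hdrop : ∀ i : Int,
      PySem.Set.contains
        ((PySem.Set.ofList al).foldl
          (fun (s : PySem.Set Int) c =>
            match ((PySem.List.enumerate n 0).foldl
              (fun (d : PySem.Dict Char Int) p => if d.contains p.2 then d else d.insert p.2 p.1)
              PySem.Dict.empty).get? c with
            | some i => PySem.Set.add s i
            | none => s)
          PySem.Set.empty) i
      = decide (∃ c, c ∈ al ∧ (fidx n c).map (fun k : Nat => (k : Int)) = some i) := by
    intro i
    apply Bool.eq_iff_iff.mpr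
    rw [PySem.Set.contains_iff, decide_eq_true_eq]
    rw [mem_drop_fold]
    simp only [PySem.Set.mem_ofList, first_get]
    constructor
    · rintro (h | ⟨c, hc, h⟩)
      · simp [PySem.Set.empty] at h
      · exact ⟨c, hc, h⟩
    · rintro ⟨c, hc, h⟩
      exact Or.inr ⟨c, hc, h⟩
  have hfn : (fun (p : Int × Char) => !(PySem.Set.contains
        ((PySem.Set.ofList al).foldl
          (fun (s : PySem.Set Int) c =>
            match ((PySem.List.enumerate n 0).foldl
              (fun (d : PySem.Dict Char Int) p => if d.contains p.2 then d else d.insert p.2 p.1)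
              PySem.Dict.empty).get? c with
            | some i => PySem.Set.add s i
            | none => s)
          PySem.Set.empty) p.1))
      = (fun (p : Int × Char) => !decide (∃ c, c ∈ al ∧ (fidx n c).map (fun k : Nat => (k : Int)) = some p.1)) := by
    funext p
    rw [hdrop p.1]
  rw [hfn]
  have hstep2 := step2 n n al [] (by simp)
  simp only [List.length_nil, Nat.cast_zero] at hstep2
  have hfilt : al.filter (fun a => decide (a ∉ ([] : List Char))) = al := by
    simp
  rw [hfilt] at hstep2
  rw [hstep2]
  have hleft : al.filter (fun ch => !(PySem.Set.contains (PySem.Set.ofList n) ch))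
      = al.filter (fun a => decide (a ∉ n)) := by
    apply List.filter_congr
    intro a _
    apply Bool.eq_iff_iff.mpr
    simp [PySem.Set.mem_ofList]
  rw [hleft]
  simp
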